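-- pv_equiv track=rewrite | github.com/ZS-UMBCHack/UMBCHack | src/main.py | create_tree_file
-- ===== SOURCE A (Python) =====
-- def create_tree_file(file, word):
--     add_char = False
--     search = False
--     tree = ""
--     for line in file:
--         if search:
--             if "/" in line:
--                 for char in line:
--                     if char != "/":
--                         tree += char
--             else:
--                 break
--         elif word in line:
--             search = True
--             for char in line:
--                 if add_char == True:
--                     tree += char
--                 elif char == "-":
--                     add_char = True
--     return tree
-- ===== SOURCE B (Python) =====
-- def create_tree_file(file, word):
--     it = iter(file)
--     for line in it:
--         if word in line:
--             dash = line.find("-")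
--             tree = line[dash + 1:] if dash != -1 else ""
--             break
--     else:
--         return ""
--     for line in it:
--         if "/" not in line:
--             break
--         tree += line.replace("/", "")
--     return tree
-- ===== Notes on version B (the rewrite author's own statement) =====
-- stated objective: simpler
-- what changed: Replaced the add_char/search boolean state machine with two sequential phases over a shared iterator: find the word line and take the substring after the first '-' via find/slice, then append '/'-stripped lines via str.replace until a line without '/'.
import Mathlib
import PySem

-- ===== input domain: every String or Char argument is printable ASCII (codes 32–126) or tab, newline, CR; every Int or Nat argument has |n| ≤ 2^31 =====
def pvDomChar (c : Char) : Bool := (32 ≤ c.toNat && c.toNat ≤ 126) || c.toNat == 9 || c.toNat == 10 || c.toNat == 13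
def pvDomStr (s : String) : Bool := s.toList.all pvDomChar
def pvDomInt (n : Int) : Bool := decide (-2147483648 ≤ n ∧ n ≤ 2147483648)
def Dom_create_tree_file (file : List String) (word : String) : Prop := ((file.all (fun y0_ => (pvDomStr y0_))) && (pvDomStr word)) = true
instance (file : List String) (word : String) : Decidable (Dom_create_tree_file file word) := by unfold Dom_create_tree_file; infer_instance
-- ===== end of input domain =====

-- B replaces A's add_char/search flag machine and per-character loops by two sequential
-- phases over one shared iterator using find/slice/replace string operations (objective: simpler).

-- ===== PORT A =====
-- A's single loop with state (add_char, search, tree); tree kept as List Char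
-- (Lean's String.append is kernel-opaque), wrapped into a String at the end.
def ctfA_loop (word : String) : List String → Bool → Bool → List Char → List Char
  | [], _, _, tree => tree
  | line :: rest, add_char, search, tree =>
    if search then
      if PySem.Str.isIn "/" line then
        ctfA_loop word rest add_char search
          (line.toList.foldl (fun t c => if c ≠ '/' then t ++ [c] else t) tree)
      else tree
    else if PySem.Str.isIn word line then
      let st := line.toList.foldl
        (fun (p : Bool × List Char) c =>
          if p.1 then (p.1, p.2 ++ [c]) else if c = '-' then (true, p.2) else p)
        (add_char, tree)
      ctfA_loop word rest st.1 true st.2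
    else ctfA_loop word rest add_char search tree

def create_tree_file (file : List String) (word : String) : String :=
  String.ofList (ctfA_loop word file false false [])

-- ===== PORT B =====
-- phase 2: append '/'-stripped lines until a line without '/'
def ctfB_phase2 : List String → List Char → List Char
  | [], tree => tree
  | line :: rest, tree =>
    if PySem.Str.isIn "/" line then
      ctfB_phase2 rest (tree ++ PySem.Chars.replace line.toList ['/'] [])
    else tree

-- phase 1: find the first line containing word; tree = text after the first '-'
def ctfB_phase1 (word : String) : List String → List Char
  | [] => []
  | line :: rest =>
    if PySem.Str.isIn word line then
      ctfB_phase2 rest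
        (let dash := PySem.Chars.find line.toList ['-']
         if dash ≠ -1 then PySem.Chars.slice line.toList (some (dash + 1)) none else [])
    else ctfB_phase1 word rest

def create_tree_file_alt (file : List String) (word : String) : String :=
  String.ofList (ctfB_phase1 word file)

-- ===== PRECONDITION & SPEC =====
def Spec_create_tree_file (file : List String) (word : String) (out : String) : Prop := out = create_tree_file_alt file word
instance (file : List String) (word : String) (out : String) : Decidable (Spec_create_tree_file file word out) := by unfold Spec_create_tree_file; infer_instance

-- ===== CLAIM (what is proved, stated in full; the proofs are below) =====
def Claim_equal_create_tree_file : Prop := ∀ (file : List String) (word : String), Dom_create_tree_file file word → Spec_create_tree_file file word (create_tree_file file word)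

-- ===== LEMMAS AND PROOFS =====

-- Python's line.replace("/", "") removes exactly the '/' characters.
theorem replace_go_slash (l acc : List Char) (fuel : Nat) (h : l.length ≤ fuel) :
    PySem.Chars.replace.go ['/'] [] fuel l acc = acc.reverse ++ l.filter (· ≠ '/') := by
  induction l generalizing acc fuel with
  | nil => cases fuel <;> simp [PySem.Chars.replace.go]
  | cons c t ih =>
    cases fuel with
    | zero => simp at h
    | succ f =>
      have h' : t.length ≤ f := by simp at h; omega
      by_cases hc : c = '/'
      · subst hc; simp [PySem.Chars.replace.go, ih _ f h']
      · have hc' : ¬ ('/' = c) := fun e => hc e.symm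
        simp [PySem.Chars.replace.go, hc, hc', ih _ f h']

theorem replace_slash (l : List Char) :
    PySem.Chars.replace l ['/'] [] = l.filter (· ≠ '/') := by
  simpa [PySem.Chars.replace] using replace_go_slash l [] l.length le_rfl

-- line.find("-") locates the first '-' (as idxOf), or -1.
theorem find_go_dash (l : List Char) (k : Nat) :
    PySem.Chars.find.go ['-'] l k =
      if '-' ∈ l then ((k : Int) + l.idxOf '-') else -1 := by
  induction l generalizing k with
  | nil => simp [PySem.Chars.find.go]
  | cons c t ih =>
    by_cases hc : c = '-'
    · subst hc; simp [PySem.Chars.find.go, List.isPrefixOf]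
    · have hc' : ¬ ('-' = c) := fun e => hc e.symm
      simp only [PySem.Chars.find.go, List.isPrefixOf]
      rw [if_neg (by simp [hc']), ih (k + 1)]
      by_cases hm : '-' ∈ t
      · have hcb : (c == '-') = false := by simp [hc]
        simp only [hm, if_true, List.mem_cons, hc', false_or, List.idxOf_cons, hcb, cond_false]
        push_cast; ring
      · simp [hm, hc']

theorem find_dash (l : List Char) :
    PySem.Chars.find l ['-'] = if '-' ∈ l then (l.idxOf '-' : Int) else -1 := by
  rw [PySem.Chars.find, find_go_dash]
  split <;> simp

-- A's search-phase loop IS B's phase 2.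
theorem searchA_eq_phase2 (word : String) (rest : List String) (ac : Bool) (tree : List Char) :
    ctfA_loop word rest ac true tree = ctfB_phase2 rest tree := by
  induction rest generalizing tree with
  | nil => rfl
  | cons line rs ih =>
    by_cases h : PySem.Chars.isIn ['/'] line.toList = true
    · simp only [ctfA_loop, ctfB_phase2, PySem.Str.isIn_eq, show "/".toList = ['/'] from rfl,
        h, if_true, ih, PySem.List.foldl_append_ite_eq_filter (p := fun c => c ≠ '/'),
        replace_slash]
    · simp only [ctfA_loop, ctfB_phase2, PySem.Str.isIn_eq, show "/".toList = ['/'] from rfl]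
      rw [if_neg h, if_neg h]
      simp

-- A's match-line character loop with add_char already true copies the rest of the line.
theorem matchfold_true (cs : List Char) (tree : List Char) :
    cs.foldl (fun (p : Bool × List Char) c =>
        if p.1 then (p.1, p.2 ++ [c]) else if c = '-' then (true, p.2) else p)
      (true, tree) = (true, tree ++ cs) := by
  induction cs generalizing tree with
  | nil => simp
  | cons c t ih => simp [ih]

-- A's match-line character loop, add_char initially false: text after the first '-'.
theorem matchfold_false (cs : List Char) (tree : List Char) :
    cs.foldl (fun (p : Bool × List Char) c =>
        if p.1 then (p.1, p.2 ++ [c]) else if c = '-' then (true, p.2) else p)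
      (false, tree) =
      if '-' ∈ cs then (true, tree ++ cs.drop (cs.idxOf '-' + 1)) else (false, tree) := by
  induction cs generalizing tree with
  | nil => simp
  | cons c t ih =>
    by_cases hc : c = '-'
    · subst hc
      simp [matchfold_true, List.idxOf_cons_self]
    · have hc' : ¬ ('-' = c) := fun e => hc e.symm
      simp only [List.foldl_cons, Bool.false_eq_true, if_neg (by simp : ¬ (false = true)),
        if_neg hc, ih, List.mem_cons, hc', false_or]
      by_cases hm : '-' ∈ t
      · have hcb : (c == '-') = false := by simp [hc]
        have hd : 1 + List.idxOf '-' t + 1 = (List.idxOf '-' t + 1) + 1 := by omega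
        simp only [if_false, ih, hm, if_true, List.idxOf_cons, hcb, cond_false, hd,
          List.drop_succ_cons]
      · simp [ih, hm]

theorem loopA_eq_phase1 (word : String) (file : List String) :
    ctfA_loop word file false false [] = ctfB_phase1 word file := by
  induction file with
  | nil => rfl
  | cons line rest ih =>
    by_cases h : PySem.Str.isIn word line = true
    · simp only [ctfA_loop, ctfB_phase1, h, if_true, Bool.false_eq_true, if_false,
        matchfold_false, find_dash]
      by_cases hm : '-' ∈ line.toList
      · have hne : ((List.idxOf '-' line.toList : Int)) ≠ -1 := by omega
        have ht : ((List.idxOf '-' line.toList : Int) + 1).toNat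
            = List.idxOf '-' line.toList + 1 := by omega
        simp only [hm, if_true, searchA_eq_phase2, PySem.Chars.slice_eq_listSlice,
          PySem.List.slice_from line.toList
            (by omega : (0:Int) ≤ (List.idxOf '-' line.toList : Int) + 1),
          ht, List.nil_append, ne_eq, hne, not_false_eq_true]
      · simp [hm, searchA_eq_phase2]
    · simp only [PySem.Str.isIn_eq] at h
      simp [ctfA_loop, ctfB_phase1, h, ih]

-- ===== VERDICT (by name: the statement is the Claim_ definition above) =====
theorem create_tree_file_spec : Claim_equal_create_tree_file := by
  intro file word _
  unfold Spec_create_tree_file create_tree_file create_tree_file_alt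
  rw [loopA_eq_phase1]
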